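-- pv_equiv track=rewrite | github.com/NVIDIA/NVFlare | nvflare/app_opt/pt/utils.py | _detect_prefix_hint
-- ===== SOURCE A (Python) =====
-- from typing import Mapping, Optional
--
-- def _detect_prefix_hint(local_keys: set[str], external_keys: tuple[str, ...]) -> Optional[str]:
--     if not local_keys or not external_keys:
--         return None
--
--     prefixes = []
--     for key in external_keys:
--         if "." in key:
--             prefix = key.split(".", 1)[0] + "."
--             if prefix not in prefixes:
--                 prefixes.append(prefix)
--
--     for prefix in prefixes:
--         if not all(key.startswith(prefix) for key in external_keys):
--             continue
--
--         stripped_keys = {key[len(prefix) :] for key in external_keys}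
--         matches = stripped_keys.intersection(local_keys)
--         if matches:
--             return (
--                 f"Hint: stripping common prefix '{prefix}' would match "
--                 f"{len(matches)}/{len(external_keys)} incoming key(s)."
--             )
--     return None
-- ===== SOURCE B (Python) =====
-- from typing import Optional
--
--
-- def _detect_prefix_hint(local_keys: set[str], external_keys: tuple[str, ...]) -> Optional[str]:
--     # Only one candidate prefix can ever pass the all(startswith) test: the
--     # first segment of the first external key. Check it directly.
--     if not local_keys or not external_keys:
--         return None
--     head = external_keys[0]
--     if "." not in head:
--         return None
--     prefix = head.split(".", 1)[0] + "."
--     if not all(key.startswith(prefix) for key in external_keys):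
--         return None
--     matches = {key[len(prefix):] for key in external_keys} & set(local_keys)
--     if not matches:
--         return None
--     return (
--         f"Hint: stripping common prefix '{prefix}' would match "
--         f"{len(matches)}/{len(external_keys)} incoming key(s)."
--     )
-- ===== Notes on version B (the rewrite author's own statement) =====
-- stated objective: simpler
-- what changed: B drops A's prefix-collection loop and dedup list entirely: since only the first external key's first segment can pass the all(startswith) test, B checks that single candidate prefix directly.
import Mathlib
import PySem

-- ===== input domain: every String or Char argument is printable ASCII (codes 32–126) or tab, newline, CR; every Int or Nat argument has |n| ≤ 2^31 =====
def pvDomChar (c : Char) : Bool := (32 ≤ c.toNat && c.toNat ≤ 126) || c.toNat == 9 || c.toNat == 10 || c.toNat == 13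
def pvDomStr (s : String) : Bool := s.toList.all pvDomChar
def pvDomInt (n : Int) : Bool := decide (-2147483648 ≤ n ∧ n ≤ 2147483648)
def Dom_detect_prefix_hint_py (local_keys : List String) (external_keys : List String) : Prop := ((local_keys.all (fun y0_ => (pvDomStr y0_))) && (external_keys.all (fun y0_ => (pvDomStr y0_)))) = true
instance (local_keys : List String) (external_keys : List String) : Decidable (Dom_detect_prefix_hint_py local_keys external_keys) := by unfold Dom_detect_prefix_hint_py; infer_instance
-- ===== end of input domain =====

-- B simplifies A: at most one candidate prefix (the first external key's first segment)
-- can pass the all(startswith) test, so B tests just that one; objective: simpler.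

-- shared helper: the f-string both Pythons format identically
def pvHintMsg (p : List Char) (m n : Nat) : String :=
  String.ofList ("Hint: stripping common prefix '".toList ++ p ++ "' would match ".toList
    ++ PySem.Int.toChars (m : Int) ++ "/".toList ++ PySem.Int.toChars (n : Int)
    ++ " incoming key(s).".toList)

-- ===== PORT A =====
-- one step of A's first loop, building the deduplicated prefix list
-- (key.split(".", 1)[0] indexes a split result, which is never empty: headI is exact)
def pvStep (acc : List (List Char)) (key : String) : List (List Char) :=
  if PySem.Chars.isIn ['.'] key.toList then
    if acc.contains ((PySem.Chars.splitOnMax key.toList ['.'] 1).headI ++ ['.']) then acc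
    else acc ++ [(PySem.Chars.splitOnMax key.toList ['.'] 1).headI ++ ['.']]
  else acc

-- the 'for prefix in prefixes' loop with its early return
-- (key[len(prefix):] is a nonnegative-start slice = List.drop, exact)
def pvLoopA (localC : List (List Char)) (ext : List String) : List (List Char) → Option String
  | [] => none
  | p :: rest =>
    if ext.all (fun k => PySem.Chars.startswith k.toList p) then
      let ms := (PySem.Set.ofList (ext.map (fun k => k.toList.drop p.length))).filter
        (fun s => localC.contains s)
      if !ms.isEmpty then some (pvHintMsg p ms.length ext.length)
      else pvLoopA localC ext rest
    else pvLoopA localC ext rest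

def detect_prefix_hint_py (local_keys : List String) (external_keys : List String) : Option String :=
  if local_keys.isEmpty || external_keys.isEmpty then none
  else
    let prefixes := external_keys.foldl pvStep ([] : List (List Char))
    pvLoopA (local_keys.map String.toList) external_keys prefixes

-- ===== PORT B =====
def detect_prefix_hint_py_alt (local_keys : List String) (external_keys : List String) : Option String :=
  if local_keys.isEmpty || external_keys.isEmpty then none
  else
    match external_keys with
    | [] => none
    | k0 :: _ =>
      if PySem.Chars.isIn ['.'] k0.toList then
        let p := (PySem.Chars.splitOnMax k0.toList ['.'] 1).headI ++ ['.']
        if external_keys.all (fun k => PySem.Chars.startswith k.toList p) then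
          let ms := (PySem.Set.ofList (external_keys.map (fun k => k.toList.drop p.length))).filter
            (fun s => (local_keys.map String.toList).contains s)
          if !ms.isEmpty then some (pvHintMsg p ms.length external_keys.length)
          else none
        else none
      else none

-- ===== PRECONDITION & SPEC =====
def Spec_detect_prefix_hint_py (local_keys : List String) (external_keys : List String) (out : Option String) : Prop := out = detect_prefix_hint_py_alt local_keys external_keys
instance (local_keys : List String) (external_keys : List String) (out : Option String) : Decidable (Spec_detect_prefix_hint_py local_keys external_keys out) := by unfold Spec_detect_prefix_hint_py; infer_instance

-- ===== CLAIM (what is proved, stated in full; the proofs are below) =====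
def Claim_equal_detect_prefix_hint_py : Prop := ∀ (local_keys : List String) (external_keys : List String), Dom_detect_prefix_hint_py local_keys external_keys → Spec_detect_prefix_hint_py local_keys external_keys (detect_prefix_hint_py local_keys external_keys)

-- ===== LEMMAS AND PROOFS =====

-- once maxsplit is exhausted, splitOnMax.go just closes the current piece
theorem pv_go_msplit_zero (fuel : Nat) (l cur : List Char) (acc : List (List Char)) :
    PySem.Chars.splitOnMax.go ['.'] fuel 0 l cur acc = ((cur.reverse ++ l) :: acc).reverse := by
  cases fuel with
  | zero => rfl
  | succ f => cases l with
    | nil => simp [PySem.Chars.splitOnMax.go]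
    | cons c rest => simp [PySem.Chars.splitOnMax.go]

theorem pv_go_one (s : List Char) (hs : '.' ∉ s) :
    ∀ (fuel : Nat) (t cur : List Char) (acc : List (List Char)),
      s.length + t.length + 1 ≤ fuel →
      PySem.Chars.splitOnMax.go ['.'] fuel 1 (s ++ '.' :: t) cur acc
        = acc.reverse ++ [cur.reverse ++ s, t] := by
  induction s with
  | nil =>
    intro fuel t cur acc hf
    cases fuel with
    | zero => omega
    | succ f =>
      simp only [List.nil_append]
      rw [show PySem.Chars.splitOnMax.go ['.'] (f+1) 1 ('.' :: t) cur acc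
            = PySem.Chars.splitOnMax.go ['.'] f 0 (List.drop 1 ('.' :: t)) [] (cur.reverse :: acc)
          from by simp [PySem.Chars.splitOnMax.go, List.isPrefixOf]]
      rw [pv_go_msplit_zero]
      simp
  | cons c s ih =>
    intro fuel t cur acc hf
    have hc : c ≠ '.' := by intro h; exact hs (h ▸ List.mem_cons_self ..)
    have hs' : '.' ∉ s := fun h => hs (List.mem_cons_of_mem _ h)
    cases fuel with
    | zero => simp at hf
    | succ f =>
      rw [show PySem.Chars.splitOnMax.go ['.'] (f+1) 1 ((c :: s) ++ '.' :: t) cur acc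
            = PySem.Chars.splitOnMax.go ['.'] f 1 (s ++ '.' :: t) (c :: cur) acc
          from by simp [PySem.Chars.splitOnMax.go, List.isPrefixOf, Ne.symm hc]]
      rw [ih hs' f t (c :: cur) acc (by simp at hf ⊢; omega)]
      simp

theorem pv_split1 (s t : List Char) (hs : '.' ∉ s) :
    PySem.Chars.splitOnMax (s ++ '.' :: t) ['.'] 1 = [s, t] := by
  unfold PySem.Chars.splitOnMax
  rw [if_neg (by norm_num)]
  rw [show (1 : Int).toNat = 1 from rfl]
  rw [pv_go_one s hs _ t [] [] (by simp only [List.length_append, List.length_cons]; omega)]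
  simp

-- decomposition of a list containing '.'
theorem pv_decomp (cs : List Char) (h : '.' ∈ cs) :
    ∃ s t, cs = s ++ '.' :: t ∧ '.' ∉ s := by
  induction cs with
  | nil => simp at h
  | cons c rest ih =>
    by_cases hc : c = '.'
    · exact ⟨[], rest, by simp [hc], by simp⟩
    · have hmem : '.' ∈ rest := by
        rcases List.mem_cons.mp h with h1 | h1
        · exact absurd h1.symm hc
        · exact h1
      obtain ⟨s, t, h1, h2⟩ := ih hmem
      refine ⟨c :: s, t, by simp [h1], ?_⟩
      simp [h2]
      exact fun h => hc h.symm

theorem pv_isIn_dot (cs : List Char) : PySem.Chars.isIn ['.'] cs = true ↔ '.' ∈ cs := by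
  rw [PySem.Chars.isIn_iff_infix]
  constructor
  · rintro ⟨l, r, h⟩; subst h; simp
  · intro h
    obtain ⟨s, t, h1, _⟩ := pv_decomp cs h
    exact ⟨s, t, by simp [h1]⟩

-- everything before the first '.' is determined
theorem pv_takeWhile (s x : List Char) (hs : '.' ∉ s) :
    (s ++ '.' :: x).takeWhile (fun c => c != '.') = s := by
  induction s with
  | nil => simp
  | cons c s ih =>
    have hc : c ≠ '.' := by intro h; exact hs (h ▸ List.mem_cons_self ..)
    have hs' : '.' ∉ s := fun h => hs (List.mem_cons_of_mem _ h)
    simp [hc, ih hs']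

theorem pv_seg_unique (s s' t t' : List Char) (hs : '.' ∉ s) (hs' : '.' ∉ s')
    (h : s ++ '.' :: t = s' ++ '.' :: t') : s = s' := by
  have := congrArg (List.takeWhile (fun c => c != '.')) h
  rwa [pv_takeWhile s t hs, pv_takeWhile s' t' hs'] at this

-- every element of the prefix list has the form s' ++ ['.'] with '.' ∉ s'
theorem pv_fold_mem (l : List String) (acc : List (List Char)) (p : List Char)
    (hp : p ∈ l.foldl pvStep acc) :
    p ∈ acc ∨ ∃ s', '.' ∉ s' ∧ p = s' ++ ['.'] := by
  induction l generalizing acc with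
  | nil => exact Or.inl hp
  | cons k l ih =>
    rcases ih (pvStep acc k) hp with h | h
    · unfold pvStep at h
      split_ifs at h with h1 h2
      · exact Or.inl h
      · rcases List.mem_append.mp h with h3 | h3
        · exact Or.inl h3
        · right
          obtain ⟨s, t, hk, hs⟩ := pv_decomp k.toList ((pv_isIn_dot _).mp h1)
          refine ⟨s, hs, ?_⟩
          rw [List.mem_singleton] at h3
          rw [h3, hk, pv_split1 s t hs]
          rfl
      · exact Or.inl h
    · exact Or.inr h

-- the fold only appends
theorem pv_fold_pref (l : List String) (acc : List (List Char)) :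
    acc <+: l.foldl pvStep acc := by
  induction l generalizing acc with
  | nil => exact List.prefix_refl _
  | cons k l ih =>
    refine List.IsPrefix.trans ?_ (ih (pvStep acc k))
    unfold pvStep
    split_ifs with h1 h2 <;> simp

-- A's second loop returns none when no prefix can produce a match
theorem pv_loopA_none (localC : List (List Char)) (ext : List String) (L : List (List Char))
    (H : ∀ p ∈ L, (ext.all (fun k => PySem.Chars.startswith k.toList p)) = true →
      ((PySem.Set.ofList (ext.map (fun k => k.toList.drop p.length))).filter
        (fun s => localC.contains s)).isEmpty = true) :
    pvLoopA localC ext L = none := by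
  induction L with
  | nil => rfl
  | cons p rest ih =>
    unfold pvLoopA
    have ih' := ih (fun q hq => H q (List.mem_cons_of_mem _ hq))
    split_ifs with h1
    · simp only [H p (List.mem_cons_self ..) h1, Bool.not_true, Bool.false_eq_true, if_false]
      exact ih'
    · exact ih'

-- if p passes the all-startswith test and k0's first segment is s, then p = s ++ ['.']
theorem pv_pass_eq (k0 : String) (rest : List String) (s t s' : List Char)
    (hk0 : k0.toList = s ++ '.' :: t) (hs : '.' ∉ s) (hs' : '.' ∉ s')
    (hpass : ((k0 :: rest).all (fun k => PySem.Chars.startswith k.toList (s' ++ ['.']))) = true) :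
    s' = s := by
  have h0 : PySem.Chars.startswith k0.toList (s' ++ ['.']) = true :=
    List.all_eq_true.mp hpass k0 (List.mem_cons_self ..)
  obtain ⟨r, hr⟩ := (PySem.Chars.startswith_iff _ _).mp h0
  rw [hk0] at hr
  exact pv_seg_unique s' s (r) t hs' hs (by simpa using hr)

-- any passing prefix forces '.' ∈ k0
theorem pv_pass_dot (k0 : String) (rest : List String) (s' : List Char)
    (hpass : ((k0 :: rest).all (fun k => PySem.Chars.startswith k.toList (s' ++ ['.']))) = true) :
    '.' ∈ k0.toList := by
  have h0 : PySem.Chars.startswith k0.toList (s' ++ ['.']) = true :=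
    List.all_eq_true.mp hpass k0 (List.mem_cons_self ..)
  obtain ⟨r, hr⟩ := (PySem.Chars.startswith_iff _ _).mp h0
  rw [← hr]
  simp

theorem pv_main (L E : List String) :
    detect_prefix_hint_py L E = detect_prefix_hint_py_alt L E := by
  by_cases h0 : (L.isEmpty || E.isEmpty) = true
  · simp [detect_prefix_hint_py, detect_prefix_hint_py_alt, h0]
  · cases E with
    | nil => simp at h0
    | cons k0 rest =>
      simp only [detect_prefix_hint_py, detect_prefix_hint_py_alt, h0, Bool.false_eq_true, if_false]
      by_cases hdot : PySem.Chars.isIn ['.'] k0.toList = true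
      · obtain ⟨s, t, hk0, hs⟩ := pv_decomp k0.toList ((pv_isIn_dot _).mp hdot)
        have hp0 : (PySem.Chars.splitOnMax k0.toList ['.'] 1).headI ++ ['.'] = s ++ ['.'] := by
          rw [hk0, pv_split1 s t hs]; rfl
        simp only [hdot, if_true, hp0]
        by_cases hpass : ((k0 :: rest).all (fun k => PySem.Chars.startswith k.toList (s ++ ['.']))) = true
        · by_cases hms :
            (((PySem.Set.ofList ((k0 :: rest).map (fun k => k.toList.drop (s ++ ['.']).length))).filter
              (fun x => (L.map String.toList).contains x)).isEmpty) = true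
          · -- matches empty: both none
            simp only [hpass, if_true, hms, Bool.not_true, Bool.false_eq_true, if_false]
            refine pv_loopA_none _ _ _ (fun p hp hpassp => ?_)
            rcases pv_fold_mem _ _ _ hp with h | ⟨s', hs', rfl⟩
            · simp at h
            · rwa [pv_pass_eq k0 rest s t s' hk0 hs hs' hpassp]
          · -- matches nonempty: both the hint
            have hpref : [s ++ ['.']] <+: (k0 :: rest).foldl pvStep [] := by
              have h1 : (k0 :: rest).foldl pvStep [] = rest.foldl pvStep [s ++ ['.']] := by
                simp only [List.foldl_cons]
                congr 1
                unfold pvStep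
                simp [hdot, hp0]
              rw [h1]
              exact pv_fold_pref rest [s ++ ['.']]
            obtain ⟨tl, htl⟩ := hpref
            rw [← htl]
            simp only [List.singleton_append, pvLoopA]
            split_ifs with h1
            · rfl
            · first
              | exact absurd hpass h1
              | exact absurd (by simpa using h1) hms
        · -- all-startswith fails: both none
          simp only [hpass, Bool.false_eq_true, if_false]
          refine pv_loopA_none _ _ _ (fun p hp hpassp => ?_)
          rcases pv_fold_mem _ _ _ hp with h | ⟨s', hs', rfl⟩
          · simp at h
          · exact absurd (pv_pass_eq k0 rest s t s' hk0 hs hs' hpassp ▸ hpassp) hpass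
      · -- first key has no '.': no prefix can pass
        simp only [hdot, Bool.false_eq_true, if_false]
        refine pv_loopA_none _ _ _ (fun p hp hpassp => ?_)
        rcases pv_fold_mem _ _ _ hp with h | ⟨s', hs', rfl⟩
        · simp at h
        · exact absurd ((pv_isIn_dot _).mpr (pv_pass_dot k0 rest s' hpassp)) hdot

-- ===== VERDICT (by name: the statement is the Claim_ definition above) =====
theorem detect_prefix_hint_py_spec : Claim_equal_detect_prefix_hint_py := by
  intro L E _
  unfold Spec_detect_prefix_hint_py
  exact pv_main L E
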